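-- pv_equiv track=rewrite | github.com/Fuxtco/RP | src/cluster_viz.py | _blocks_from_sequence
-- ===== SOURCE A (Python) =====
-- from typing import List, Optional, Tuple, Dict
--
-- def _blocks_from_sequence(seq: List[int]) -> List[Tuple[int, int]]:
--     """
--     seq is a list of group IDs aligned with DISPLAY ORDER.
--     Return blocks as consecutive equal segments: [(start,end),...]
--     """
--     blocks = []
--     if len(seq) == 0:
--         return blocks
--     start = 0
--     prev = seq[0]
--     for k in range(1, len(seq)):
--         if seq[k] != prev:
--             blocks.append((start, k - 1))
--             start = k
--             prev = seq[k]
--     blocks.append((start, len(seq) - 1))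
--     return blocks
-- ===== SOURCE B (Python) =====
-- from typing import List, Tuple
--
-- def _blocks_from_sequence(seq: List[int]) -> List[Tuple[int, int]]:
--     if not seq:
--         return []
--     # Stage 1: boundary detection — indices where a new run starts.
--     starts = [0] + [k for k, (a, b) in enumerate(zip(seq, seq[1:]), 1) if a != b]
--     # Stage 2: pair each start with the next start (or the length) to form blocks.
--     ends = starts[1:] + [len(seq)]
--     return [(s, e - 1) for s, e in zip(starts, ends)]
-- ===== Notes on version B (the rewrite author's own statement) =====
-- stated objective: alternative
-- what changed: Replaces A's single stateful loop (prev/start accumulator with a final trailing append) by two staged passes: first detect all run-start boundaries via a pairwise zip comprehension, then zip the boundary list with its own shifted copy to form the (start,end) blocks.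
import Mathlib
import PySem

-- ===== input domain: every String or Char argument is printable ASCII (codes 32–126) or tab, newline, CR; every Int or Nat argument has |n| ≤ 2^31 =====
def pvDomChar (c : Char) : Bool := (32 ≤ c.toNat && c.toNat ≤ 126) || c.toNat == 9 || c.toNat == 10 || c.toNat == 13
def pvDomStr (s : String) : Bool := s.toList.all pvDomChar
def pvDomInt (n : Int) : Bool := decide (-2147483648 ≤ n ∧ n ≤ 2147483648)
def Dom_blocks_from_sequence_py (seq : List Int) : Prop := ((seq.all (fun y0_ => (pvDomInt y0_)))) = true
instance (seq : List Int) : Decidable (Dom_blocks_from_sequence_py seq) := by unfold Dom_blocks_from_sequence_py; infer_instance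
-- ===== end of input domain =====

-- B replaces A's single stateful scan by two staged passes: boundary detection
-- over pairwise-zipped neighbours, then zipping the boundary list with its own
-- shifted copy (objective: alternative decomposition, same O(n) cost).

-- ===== PORT A =====
-- the 'for k in range(1, len(seq))' loop, state = (blocks, start, prev), k the index of v
def loopA : List Int → Int → List (Int × Int) → Int → Int → (List (Int × Int) × Int)
  | [], _, blocks, start, _ => (blocks, start)
  | v :: rest, k, blocks, start, prev =>
    if v ≠ prev then loopA rest (k + 1) (blocks ++ [(start, k - 1)]) k v
    else loopA rest (k + 1) blocks start prev

def blocks_from_sequence_py (seq : List Int) : List (Int × Int) :=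
  match seq with
  | [] => []
  | x :: xs =>
    let r := loopA xs 1 [] 0 x
    r.1 ++ [(r.2, (seq.length : Int) - 1)]

-- ===== PORT B =====
def blocks_from_sequence_py_alt (seq : List Int) : List (Int × Int) :=
  if seq = [] then []
  else
    -- starts = [0] + [k for k, (a, b) in enumerate(zip(seq, seq[1:]), 1) if a != b]
    let starts : List Int :=
      (0 : Int) ::
        ((PySem.List.enumerate (seq.zip (PySem.List.slice seq (some 1) none)) 1).filter
            (fun p => p.2.1 != p.2.2)).map (fun p => p.1)
    -- ends = starts[1:] + [len(seq)]
    let ends : List Int := PySem.List.slice starts (some 1) none ++ [(seq.length : Int)]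
    (starts.zip ends).map (fun p => (p.1, p.2 - 1))

-- ===== PRECONDITION & SPEC =====
def Spec_blocks_from_sequence_py (seq : List Int) (out : List (Int × Int)) : Prop := out = blocks_from_sequence_py_alt seq
instance (seq : List Int) (out : List (Int × Int)) : Decidable (Spec_blocks_from_sequence_py seq out) := by unfold Spec_blocks_from_sequence_py; infer_instance

-- ===== CLAIM (what is proved, stated in full; the proofs are below) =====
def Claim_equal_blocks_from_sequence_py : Prop := ∀ (seq : List Int), Dom_blocks_from_sequence_py seq → Spec_blocks_from_sequence_py seq (blocks_from_sequence_py seq)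

-- ===== LEMMAS AND PROOFS =====

-- proof-only: split off the maximal run of elements equal to x; (extra length, rest)
def takeRun (x : Int) : List Int → Nat × List Int
  | [] => (0, [])
  | y :: ys => if y = x then let p := takeRun x ys; (p.1 + 1, p.2) else (0, y :: ys)

theorem takeRun_length_le (x : Int) : ∀ xs : List Int, (takeRun x xs).2.length ≤ xs.length := by
  intro xs
  induction xs with
  | nil => simp [takeRun]
  | cons y ys ih =>
    simp only [takeRun]
    split
    · simpa using Nat.le_succ_of_le ih
    · simp

theorem takeRun_length (x : Int) : ∀ xs : List Int, (takeRun x xs).1 + (takeRun x xs).2.length = xs.length := by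
  intro xs
  induction xs with
  | nil => simp [takeRun]
  | cons y ys ih =>
    by_cases h : y = x
    · rw [show takeRun x (y :: ys) = ((takeRun x ys).1 + 1, (takeRun x ys).2) from by
        simp [takeRun, h]]
      simp only [List.length_cons]
      omega
    · simp [takeRun, h]

-- proof-only common form: run-by-run block list
def groupBlocks : List Int → Int → List (Int × Int)
  | [], _ => []
  | x :: xs, start =>
    let p := takeRun x xs
    (start, start + (p.1 : Int)) :: groupBlocks p.2 (start + (p.1 : Int) + 1)
termination_by l _ => l.length
decreasing_by
  exact Nat.lt_succ_of_le (takeRun_length_le x xs)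

-- proof-only: the absolute indices where a new run starts (first element at index k-1 = prev)
def bounds : List Int → Int → Int → List Int
  | [], _, _ => []
  | v :: r, k, prev => if v ≠ prev then k :: bounds r (k + 1) v else bounds r (k + 1) v

-- A side: loopA produces groupBlocks (proved by induction over the tail)
theorem loopA_eq : ∀ (xs : List Int) (k start prev : Int) (blocks : List (Int × Int)),
    (loopA xs k blocks start prev).1 ++ [((loopA xs k blocks start prev).2, k + xs.length - 1)] =
      blocks ++ ((start, k + ((takeRun prev xs).1 : Int) - 1)
        :: groupBlocks (takeRun prev xs).2 (k + ((takeRun prev xs).1 : Int))) := by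
  intro xs
  induction xs with
  | nil => intro k start prev blocks; simp [loopA, takeRun, groupBlocks]
  | cons v rest ih =>
    intro k start prev blocks
    by_cases hv : v = prev
    · subst hv
      rw [show loopA (v :: rest) k blocks start v = loopA rest (k + 1) blocks start v from by
        simp [loopA]]
      rw [show takeRun v (v :: rest) = ((takeRun v rest).1 + 1, (takeRun v rest).2) from by
        simp [takeRun]]
      rcases hp : takeRun v rest with ⟨m, r⟩
      have h := ih (k + 1) start v blocks
      rw [hp] at h
      simp only [List.length_cons] at *
      push_cast
      rw [show (k : Int) + (↑rest.length + 1) - 1 = (k + 1) + ↑rest.length - 1 from by ring, h]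
      rw [show (k : Int) + 1 + ↑m - 1 = k + (↑m + 1) - 1 from by ring,
          show (k : Int) + 1 + ↑m = k + (↑m + 1) from by ring]
    · rw [show loopA (v :: rest) k blocks start prev
            = loopA rest (k + 1) (blocks ++ [(start, k - 1)]) k v from by
        simp [loopA, hv]]
      rw [show takeRun prev (v :: rest) = (0, v :: rest) from by simp [takeRun, hv]]
      rcases hp : takeRun v rest with ⟨m, r⟩
      have h := ih (k + 1) k v (blocks ++ [(start, k - 1)])
      rw [hp] at h
      simp only [List.length_cons] at *
      push_cast
      rw [show (k : Int) + (↑rest.length + 1) - 1 = (k + 1) + ↑rest.length - 1 from by ring, h]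
      rw [groupBlocks, hp]
      simp only [List.append_assoc, List.cons_append, List.nil_append]
      rw [show (k : Int) + 1 + ↑m - 1 = k + ↑m from by ring,
          show (k : Int) + 1 + ↑m = k + ↑m + 1 from by ring]
      norm_num

-- B side, stage 1: the enumerate/zip/filter/map pipeline computes bounds
theorem pipeline_eq_bounds : ∀ (xs : List Int) (prev k : Int),
    ((PySem.List.enumerate ((prev :: xs).zip xs) k).filter
        (fun p => p.2.1 != p.2.2)).map (fun p => p.1) = bounds xs k prev := by
  intro xs
  induction xs with
  | nil => intro prev k; simp [bounds]
  | cons v r ih =>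
    intro prev k
    rw [show (prev :: v :: r).zip (v :: r) = (prev, v) :: ((v :: r).zip r) from rfl,
        PySem.List.enumerate_cons]
    by_cases hv : v = prev
    · subst hv
      simp only [List.filter_cons, bne_self_eq_false, Bool.false_eq_true, if_false]
      rw [ih, bounds]
      simp
    · have hb : ((prev : Int) != v) = true := by
        simpa [bne_iff_ne] using Ne.symm hv
      simp only [List.filter_cons, hb, if_true, List.map_cons]
      rw [ih v (k + 1), show bounds (v :: r) k prev = k :: bounds r (k + 1) v from by
        simp [bounds, hv]]

-- B side, stage 2: bounds refine one run at a time
theorem bounds_run : ∀ (r : List Int) (k prev : Int),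
    bounds r k prev =
      match takeRun prev r with
      | (_, []) => []
      | (m, v :: r') => (k + (m : Int)) :: bounds r' (k + (m : Int) + 1) v := by
  intro r
  induction r with
  | nil => intro k prev; simp [bounds, takeRun]
  | cons y ys ih =>
    intro k prev
    by_cases hy : y = prev
    · subst hy
      rw [show bounds (y :: ys) k y = bounds ys (k + 1) y from by simp [bounds]]
      rw [show takeRun y (y :: ys) = ((takeRun y ys).1 + 1, (takeRun y ys).2) from by
        simp [takeRun]]
      rw [ih (k + 1) y]
      rcases takeRun y ys with ⟨m, r'⟩
      cases r' with
      | nil => rfl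
      | cons v t =>
        simp only []
        push_cast
        rw [show (k : Int) + 1 + ↑m = k + (↑m + 1) from by ring]
    · rw [show bounds (y :: ys) k prev = k :: bounds ys (k + 1) y from by simp [bounds, hy]]
      rw [show takeRun prev (y :: ys) = (0, y :: ys) from by simp [takeRun, hy]]
      simp

theorem groupBlocks_cons (x : Int) (xs : List Int) (m : Nat) (rest : List Int) (s : Int)
    (hp : takeRun x xs = (m, rest)) :
    groupBlocks (x :: xs) s = (s, s + (m : Int)) :: groupBlocks rest (s + (m : Int) + 1) := by
  conv_lhs => rw [groupBlocks]
  rw [hp]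

-- helper for stage 3
def zipBlocks (starts : List Int) (n : Int) : List (Int × Int) :=
  (starts.zip (starts.tail ++ [n])).map (fun p => (p.1, p.2 - 1))

theorem zipBlocks_cons_cons (a b : Int) (t : List Int) (n : Int) :
    zipBlocks (a :: b :: t) n = (a, b - 1) :: zipBlocks (b :: t) n := by
  simp [zipBlocks]

theorem zipBlocks_eq_groupBlocks : ∀ (n : Nat) (y : Int) (r : List Int) (s : Int),
    (y :: r).length ≤ n →
    zipBlocks (s :: bounds r (s + 1) y) (s + (r.length : Int) + 1) = groupBlocks (y :: r) s := by
  intro n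
  induction n with
  | zero => intro y r s h; simp at h
  | succ n ih =>
    intro y r s h
    rw [bounds_run r (s + 1) y]
    rcases hp : takeRun y r with ⟨m, rest⟩
    have hlen := takeRun_length y r
    rw [hp] at hlen
    simp only at hlen
    cases rest with
    | nil =>
      rw [groupBlocks_cons y r m [] s hp]
      simp only [List.length_nil] at hlen
      simp [zipBlocks, groupBlocks]
      omega
    | cons v r' =>
      simp only []
      rw [zipBlocks_cons_cons]
      rw [show (s + 1 + (m : Int)) = s + (m : Int) + 1 from by ring]
      have hr : r.length = m + 1 + r'.length := by
        simp only [List.length_cons] at hlen; omega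
      have hle : (v :: r').length ≤ n := by
        simp only [List.length_cons] at h ⊢; omega
      have hN : s + (r.length : Int) + 1 = s + (m : Int) + 1 + (r'.length : Int) + 1 := by
        rw [hr]; push_cast; ring
      rw [hN, ih v r' (s + (m : Int) + 1) hle]
      rw [groupBlocks_cons y r m (v :: r') s hp]
      norm_num

theorem A_eq_groupBlocks (seq : List Int) : blocks_from_sequence_py seq = groupBlocks seq 0 := by
  cases seq with
  | nil => simp [blocks_from_sequence_py, groupBlocks]
  | cons x xs =>
    show (loopA xs 1 [] 0 x).1 ++ [((loopA xs 1 [] 0 x).2, ((x :: xs).length : Int) - 1)]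
        = groupBlocks (x :: xs) 0
    have h := loopA_eq xs 1 0 x []
    rcases hp : takeRun x xs with ⟨m, r⟩
    rw [hp] at h
    simp only [List.nil_append, List.length_cons] at *
    push_cast
    rw [show ((xs.length : Int) + 1) - 1 = 1 + ↑xs.length - 1 from by ring, h, groupBlocks, hp]
    rw [show (1 : Int) + ↑m - 1 = 0 + ↑m from by ring, show (1 : Int) + ↑m = 0 + ↑m + 1 from by ring]

-- ===== VERDICT (by name: the statement is the Claim_ definition above) =====
theorem blocks_from_sequence_py_spec : Claim_equal_blocks_from_sequence_py := by
  intro seq _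
  unfold Spec_blocks_from_sequence_py blocks_from_sequence_py_alt
  cases seq with
  | nil => simp [blocks_from_sequence_py]
  | cons x xs =>
    rw [if_neg (by simp)]
    simp only [PySem.List.slice_from_one, List.tail_cons]
    rw [pipeline_eq_bounds xs x 1]
    have hz : (((0 : Int) :: bounds xs 1 x).zip
          (bounds xs 1 x ++ [((x :: xs).length : Int)])).map (fun p => (p.1, p.2 - 1))
        = zipBlocks ((0 : Int) :: bounds xs 1 x) (((x :: xs).length : Int)) := by
      simp [zipBlocks]
    rw [hz]
    have h := zipBlocks_eq_groupBlocks (x :: xs).length x xs 0 (le_refl _)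
    rw [show ((0 : Int) + 1) = 1 from by ring,
        show (0 : Int) + (xs.length : Int) + 1 = ((x :: xs).length : Int) from by
          push_cast [List.length_cons]; ring] at h
    rw [h, A_eq_groupBlocks]
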